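-- pv_equiv track=rewrite | github.com/guyil/mini_claw | backend/app/services/feishu_calendar_service.py | _pick_calendar
-- ===== SOURCE A (Python) =====
-- from typing import Any
--
-- def _pick_calendar(
--     calendars: list[dict[str, Any]],
--     need_write: bool = False,
-- ) -> str:
--     """从日历列表中选择最合适的日历
--
--     优先级：owner > writer > reader (need_write=False 时也包含 reader)
--     """
--     writable_roles = ("owner", "writer")
--     readable_roles = ("owner", "writer", "reader")
--
--     for role_set in (writable_roles, readable_roles) if need_write else (readable_roles,):
--         for c in calendars:
--             if c.get("type") == "primary" and c.get("role") in role_set: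
--                 return c["calendar_id"]
--
--     if calendars:
--         return calendars[0]["calendar_id"]
--     return ""
-- ===== SOURCE B (Python) =====
-- def _pick_calendar(
--     calendars: list,
--     need_write: bool = False,
-- ) -> str:
--     """Single pass: keep the first primary calendar of the best role rank."""
--     best = None
--     best_rank = 0
--     for c in calendars:
--         if c.get("type") != "primary":
--             continue
--         role = c.get("role")
--         if need_write:
--             if role in ("owner", "writer"):
--                 rank = 0
--             elif role == "reader":
--                 rank = 1
--             else:
--                 continue
--         else:
--             if role in ("owner", "writer", "reader"):
--                 rank = 0
--             else:
--                 continue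
--         if best is None or rank < best_rank:
--             best = c
--             best_rank = rank
--     if best is not None:
--         return best["calendar_id"]
--     if calendars:
--         return calendars[0]["calendar_id"]
--     return ""
-- ===== Notes on version B (the rewrite author's own statement) =====
-- stated objective: alternative
-- what changed: Replaces A's two-pass scan (one pass per role set) by a single pass that ranks each primary calendar by role and keeps the first calendar of the best rank (strict comparison preserves first-in-list tie-breaking).
import Mathlib
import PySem

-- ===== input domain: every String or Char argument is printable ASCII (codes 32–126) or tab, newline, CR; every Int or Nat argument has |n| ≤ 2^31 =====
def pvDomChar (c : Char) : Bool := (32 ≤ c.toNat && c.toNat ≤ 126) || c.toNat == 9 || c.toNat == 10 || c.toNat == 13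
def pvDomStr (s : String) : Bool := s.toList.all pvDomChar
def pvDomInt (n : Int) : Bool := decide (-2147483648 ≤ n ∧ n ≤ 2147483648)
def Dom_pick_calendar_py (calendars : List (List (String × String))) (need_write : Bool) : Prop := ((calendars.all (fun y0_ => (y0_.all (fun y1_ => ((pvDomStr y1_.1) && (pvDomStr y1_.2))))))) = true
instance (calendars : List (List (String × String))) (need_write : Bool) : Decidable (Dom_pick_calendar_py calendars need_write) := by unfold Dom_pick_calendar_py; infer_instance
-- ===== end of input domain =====

-- B replaces A's two sequential scans by a single ranked pass; equivalence of the return value on Pre_.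

-- ===== PORT A =====
-- c.get("type") == "primary" and c.get("role") in role_set
def pvMatchA (role_set : List String) (c : List (String × String)) : Bool :=
  (c.lookup "type" == some "primary") &&
  (match c.lookup "role" with
   | some r => role_set.contains r
   | none => false)

-- inner loop: first calendar matching the role set
def pvFindA (role_set : List String) : List (List (String × String)) → Option (List (String × String))
  | [] => none
  | c :: cs => if pvMatchA role_set c then some c else pvFindA role_set cs

-- outer loop over role sets
def pvLoopA (sets : List (List String)) (calendars : List (List (String × String))) : Option (List (String × String)) :=
  match sets with
  | [] => none
  | s :: rest =>
    match pvFindA s calendars with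
    | some c => some c
    | none => pvLoopA rest calendars

def pick_calendar_py (calendars : List (List (String × String))) (need_write : Bool) : String :=
  let sets := if need_write then [["owner", "writer"], ["owner", "writer", "reader"]]
              else [["owner", "writer", "reader"]]
  match pvLoopA sets calendars with
  | some c => (c.lookup "calendar_id").getD ""  -- c["calendar_id"]; some under Pre_
  | none =>
    match calendars with
    | c :: _ => (c.lookup "calendar_id").getD ""
    | [] => ""

-- ===== PORT B =====
-- rank of a candidate calendar, none = skipped
def pvRankB (need_write : Bool) (c : List (String × String)) : Option Nat :=
  if c.lookup "type" ≠ some "primary" then none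
  else
    let role := c.lookup "role"
    if need_write then
      if role = some "owner" ∨ role = some "writer" then some 0
      else if role = some "reader" then some 1
      else none
    else
      if role = some "owner" ∨ role = some "writer" ∨ role = some "reader" then some 0
      else none

-- one step of the single pass: update (best, best_rank)
def pvStepB (need_write : Bool) (st : Option (List (String × String)) × Nat)
    (c : List (String × String)) : Option (List (String × String)) × Nat :=
  match pvRankB need_write c with
  | none => st
  | some r => if st.1 = none ∨ r < st.2 then (some c, r) else st

def pick_calendar_py_alt (calendars : List (List (String × String))) (need_write : Bool) : String :=
  let st := calendars.foldl (pvStepB need_write) (none, 0)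
  match st.1 with
  | some c => (c.lookup "calendar_id").getD ""
  | none =>
    match calendars with
    | c :: _ => (c.lookup "calendar_id").getD ""
    | [] => ""

-- ===== PRECONDITION & SPEC =====
-- does the dict A selects (or the calendars[0] fallback) carry a "calendar_id" key?
def pvSelKeyOk : Option (List (String × String)) → List (List (String × String)) → Bool
  | some c, _ => (c.lookup "calendar_id").isSome
  | none, [] => true
  | none, c :: _ => (c.lookup "calendar_id").isSome

-- A (and B) raise KeyError exactly when the one dict they index — the first primary calendar with the
-- best-available role, else calendars[0] — lacks a "calendar_id" key; Pre_ excludes exactly those inputs.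
def Pre_pick_calendar_py (calendars : List (List (String × String))) (need_write : Bool) : Prop :=
  pvSelKeyOk
    (if need_write then
      ((calendars.find? (pvMatchA ["owner", "writer"])).orElse
        (fun _ => calendars.find? (pvMatchA ["owner", "writer", "reader"])))
     else calendars.find? (pvMatchA ["owner", "writer", "reader"]))
    calendars = true
instance (calendars : List (List (String × String))) (need_write : Bool) : Decidable (Pre_pick_calendar_py calendars need_write) := by unfold Pre_pick_calendar_py; infer_instance

def pvWitness_pick_calendar_py : (List (List (String × String))) × Bool :=
  ([[("type", "primary"), ("role", "owner"), ("calendar_id", "cal1")],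
    [("type", "primary"), ("role", "reader"), ("calendar_id", "cal2")]], true)

def Spec_pick_calendar_py (calendars : List (List (String × String))) (need_write : Bool) (out : String) : Prop := out = pick_calendar_py_alt calendars need_write
instance (calendars : List (List (String × String))) (need_write : Bool) (out : String) : Decidable (Spec_pick_calendar_py calendars need_write out) := by unfold Spec_pick_calendar_py; infer_instance

-- ===== CLAIM (what is proved, stated in full; the proofs are below) =====
def Claim_equal_pick_calendar_py : Prop := ∀ (calendars : List (List (String × String))) (need_write : Bool), Dom_pick_calendar_py calendars need_write → Pre_pick_calendar_py calendars need_write → Spec_pick_calendar_py calendars need_write (pick_calendar_py calendars need_write)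

-- ===== LEMMAS AND PROOFS =====

-- rank ↔ role-set membership, need_write = true
lemma rank_true_eq (c : List (String × String)) :
    pvRankB true c =
      (if pvMatchA ["owner", "writer"] c then some 0
       else if pvMatchA ["owner", "writer", "reader"] c then some 1 else none) := by
  unfold pvRankB pvMatchA
  cases hR : c.lookup "role" with
  | none => simp
  | some r =>
    by_cases ht : c.lookup "type" = some "primary"
    · by_cases h1 : r = "owner" <;> by_cases h2 : r = "writer" <;> by_cases h3 : r = "reader" <;>
        simp [ht, h1, h2, h3]
    · simp [ht]

-- rank ↔ role-set membership, need_write = false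
lemma rank_false_eq (c : List (String × String)) :
    pvRankB false c =
      (if pvMatchA ["owner", "writer", "reader"] c then some 0 else none) := by
  unfold pvRankB pvMatchA
  cases hR : c.lookup "role" with
  | none => simp
  | some r =>
    by_cases ht : c.lookup "type" = some "primary"
    · by_cases h1 : r = "owner" <;> by_cases h2 : r = "writer" <;> by_cases h3 : r = "reader" <;>
        simp [ht, h1, h2, h3]
    · simp [ht]

-- once a rank-0 best is held, the pass never changes it
lemma fold_from_rank0 (nw : Bool) (c0 : List (String × String))
    (cs : List (List (String × String))) :
    cs.foldl (pvStepB nw) (some c0, 0) = (some c0, 0) := by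
  induction cs with
  | nil => rfl
  | cons c cs ih =>
    simp only [List.foldl_cons, pvStepB]
    cases pvRankB nw c with
    | none => exact ih
    | some r => simp; exact ih

-- from a rank-1 best, only a writable match can displace it (need_write = true)
lemma fold_from_rank1 (c0 : List (String × String)) (cs : List (List (String × String))) :
    cs.foldl (pvStepB true) (some c0, 1) =
      (match pvFindA ["owner", "writer"] cs with
       | some d => (some d, 0)
       | none => (some c0, 1)) := by
  induction cs with
  | nil => rfl
  | cons c cs ih =>
    simp only [List.foldl_cons, pvStepB, pvFindA, rank_true_eq]
    by_cases hw : pvMatchA ["owner", "writer"] c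
    · simp [hw, fold_from_rank0]
    · by_cases hr : pvMatchA ["owner", "writer", "reader"] c
      · simp [hw, hr]; exact ih
      · simp [hw, hr]; exact ih

-- the whole pass from the empty state, need_write = true
lemma fold_true (cs : List (List (String × String))) :
    cs.foldl (pvStepB true) (none, 0) =
      (match pvFindA ["owner", "writer"] cs with
       | some d => (some d, 0)
       | none =>
         match pvFindA ["owner", "writer", "reader"] cs with
         | some d => (some d, 1)
         | none => (none, 0)) := by
  induction cs with
  | nil => rfl
  | cons c cs ih =>
    simp only [List.foldl_cons, pvStepB, pvFindA, rank_true_eq]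
    by_cases hw : pvMatchA ["owner", "writer"] c
    · simp [hw, fold_from_rank0]
    · by_cases hr : pvMatchA ["owner", "writer", "reader"] c
      · simp [hw, hr, fold_from_rank1]
      · simp [hw, hr]; exact ih

-- the whole pass from the empty state, need_write = false
lemma fold_false (cs : List (List (String × String))) :
    cs.foldl (pvStepB false) (none, 0) =
      (match pvFindA ["owner", "writer", "reader"] cs with
       | some d => (some d, 0)
       | none => (none, 0)) := by
  induction cs with
  | nil => rfl
  | cons c cs ih =>
    simp only [List.foldl_cons, pvStepB, pvFindA, rank_false_eq]
    by_cases hr : pvMatchA ["owner", "writer", "reader"] c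
    · simp [hr, fold_from_rank0]
    · simp [hr]; exact ih

-- ===== VERDICT (by name: the statement is the Claim_ definition above) =====
theorem pick_calendar_py_spec : Claim_equal_pick_calendar_py := by
  intro calendars need_write _ _
  unfold Spec_pick_calendar_py pick_calendar_py pick_calendar_py_alt
  cases need_write with
  | false =>
    simp only [Bool.false_eq_true, if_false, fold_false, pvLoopA]
    cases pvFindA ["owner", "writer", "reader"] calendars <;> simp
  | true =>
    simp only [if_true, fold_true, pvLoopA]
    cases hw : pvFindA ["owner", "writer"] calendars with
    | some d => simp
    | none =>
      cases hr : pvFindA ["owner", "writer", "reader"] calendars <;> simp
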